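-- pv_equiv track=rewrite | github.com/stenknutsen/HomeGrownPOSTagger | PhaseFourTagging.py | CD_UNK_there_PUNC_Tagger
-- ===== SOURCE A (Python) =====
-- def CD_UNK_there_PUNC_Tagger(sent):
--     sentToReturn = []
--     skip = 0
--
--     for i in range(len(sent)):
--
--         if skip>0:
--             skip = skip -1
--             continue
--
--
--         if (i)<0 | (i+3)>=len(sent):
--             sentToReturn += [sent[i]]
--             continue
--
--         leftContext = sent[i]
--         leftTarget = sent[i+1]
--         rightTarget = sent[i+2]
--         rightContext = sent[i+3]
--
--
--         if (leftContext[1]=="CD")&(leftTarget[1]=="UNK")&(rightTarget[0].lower()=="there")&((rightContext[0]==",")|(rightContext[0]==".")):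
--
--             sentToReturn += [leftContext]
--             sentToReturn += [(leftTarget[0], "NNS")]
--             sentToReturn += [(rightTarget[0],"RB")]
--             sentToReturn += [rightContext]
--             skip = 3
--
--         else:
--             sentToReturn += [leftContext]
--
--     return sentToReturn
-- ===== SOURCE B (Python) =====
-- def CD_UNK_there_PUNC_Tagger(sent):
--     # Two stages: first a scan that only RECORDS which positions get a new tag
--     # (in a dict index -> tag), then one comprehension that rebuilds the
--     # sentence, consulting the dict.  No output accumulation during the scan.
--     retag = {}
--     i = 0
--     n = len(sent)
--     while i + 3 < n:
--         if sent[i][1] == "CD" and sent[i + 1][1] == "UNK" \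
--                 and sent[i + 2][0].lower() == "there" \
--                 and sent[i + 3][0] in (",", "."):
--             retag[i + 1] = "NNS"
--             retag[i + 2] = "RB"
--             i += 4
--         else:
--             i += 1
--     return [(w, retag.get(j, t)) for j, (w, t) in enumerate(sent)]
-- ===== Notes on version B (the rewrite author's own statement) =====
-- stated objective: alternative
-- what changed: Replaces A's single pass that accumulates the output while scanning (for-loop with a skip counter and an obfuscated chained/bitwise guard) by a two-stage mark-then-rewrite algorithm: a first scan only records the retagged positions in a dict index->tag, and a second pass rebuilds the whole sentence with one comprehension consulting that dict; correctness rests on the fact that a match never changes words, only the tags at positions i+1 and i+2.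
import Mathlib
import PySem

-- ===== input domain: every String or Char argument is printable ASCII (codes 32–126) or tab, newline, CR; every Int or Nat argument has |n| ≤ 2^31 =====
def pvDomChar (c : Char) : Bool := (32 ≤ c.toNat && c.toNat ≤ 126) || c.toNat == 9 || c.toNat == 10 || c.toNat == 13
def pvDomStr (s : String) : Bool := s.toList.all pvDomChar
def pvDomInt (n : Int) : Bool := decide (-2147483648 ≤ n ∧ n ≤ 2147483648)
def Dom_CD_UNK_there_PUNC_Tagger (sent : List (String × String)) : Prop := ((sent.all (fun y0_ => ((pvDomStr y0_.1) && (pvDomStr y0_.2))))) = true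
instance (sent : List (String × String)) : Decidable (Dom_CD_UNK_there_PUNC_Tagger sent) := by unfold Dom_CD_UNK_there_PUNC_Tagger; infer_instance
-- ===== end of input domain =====

-- B replaces A's accumulate-while-scanning pass by a two-stage mark-then-rewrite
-- algorithm (a scan records retagged positions in a dict, then one comprehension
-- rebuilds the sentence); objective: alternative, same return value everywhere.

-- the retagging predicate, computed identically by both Pythons
def pvHit (lc lt rt rc : String × String) : Bool :=
  (lc.2 == "CD") && (lt.2 == "UNK") && (PySem.Str.lower rt.1 == "there")
    && ((rc.1 == ",") || (rc.1 == "."))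

-- ===== PORT A =====
-- one iteration of A's for-loop body, state = (sentToReturn, skip)
def pvStepA (sent : List (String × String)) (st : List (String × String) × Int) (i : Int) :
    List (String × String) × Int :=
  if st.2 > 0 then (st.1, st.2 - 1)
  -- Python: (i)<0 | (i+3)>=len(sent)  ≡  i < (0 | (i+3)) and (0 | (i+3)) >= len(sent)
  else if i < PySem.Int.bor 0 (i + 3) ∧ PySem.Int.bor 0 (i + 3) ≥ (sent.length : Int) then
    (st.1 ++ [PySem.List.pyGetD sent i ("", "")], st.2)
  else
    let leftContext := PySem.List.pyGetD sent i ("", "")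
    let leftTarget := PySem.List.pyGetD sent (i + 1) ("", "")
    let rightTarget := PySem.List.pyGetD sent (i + 2) ("", "")
    let rightContext := PySem.List.pyGetD sent (i + 3) ("", "")
    if pvHit leftContext leftTarget rightTarget rightContext then
      (st.1 ++ [leftContext] ++ [(leftTarget.1, "NNS")] ++ [(rightTarget.1, "RB")]
        ++ [rightContext], 3)
    else (st.1 ++ [leftContext], st.2)

def CD_UNK_there_PUNC_Tagger (sent : List (String × String)) : List (String × String) :=
  ((PySem.List.pyRange 0 (sent.length : Int) 1).foldl (pvStepA sent) ([], 0)).1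

-- ===== PORT B =====
-- stage 1 of Source B: the while loop that only RECORDS retagged positions (dict index -> tag)
def pvScanB (sent : List (String × String)) (i : Nat) (d : PySem.Dict Int String) :
    PySem.Dict Int String :=
  if h : i + 3 < sent.length then
    if pvHit (sent[i]'(by omega)) (sent[i+1]'(by omega)) (sent[i+2]'(by omega)) (sent[i+3]'h) then
      pvScanB sent (i + 4) ((d.insert ((i : Int) + 1) "NNS").insert ((i : Int) + 2) "RB")
    else pvScanB sent (i + 1) d
  else d
termination_by sent.length - i
decreasing_by all_goals omega

-- stage 2 of Source B: one comprehension over enumerate(sent) consulting the dict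
def CD_UNK_there_PUNC_Tagger_alt (sent : List (String × String)) : List (String × String) :=
  let retag := pvScanB sent 0 PySem.Dict.empty
  (PySem.List.enumerate sent).map (fun p => (p.2.1, retag.getD p.1 p.2.2))

-- ===== PRECONDITION & SPEC =====
def Spec_CD_UNK_there_PUNC_Tagger (sent : List (String × String)) (out : List (String × String)) : Prop := out = CD_UNK_there_PUNC_Tagger_alt sent
instance (sent : List (String × String)) (out : List (String × String)) : Decidable (Spec_CD_UNK_there_PUNC_Tagger sent out) := by unfold Spec_CD_UNK_there_PUNC_Tagger; infer_instance

-- ===== CLAIM (what is proved, stated in full; the proofs are below) =====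
def Claim_equal_CD_UNK_there_PUNC_Tagger : Prop := ∀ (sent : List (String × String)), Dom_CD_UNK_there_PUNC_Tagger sent → Spec_CD_UNK_there_PUNC_Tagger sent (CD_UNK_there_PUNC_Tagger sent)

-- ===== LEMMAS AND PROOFS =====

-- proof-side recursive characterisation both ports are reduced to
def pvGoB : List (String × String) → List (String × String)
  | lc :: lt :: rt :: rc :: rest =>
    if pvHit lc lt rt rc then
      lc :: (lt.1, "NNS") :: (rt.1, "RB") :: rc :: pvGoB rest
    else
      lc :: pvGoB (lt :: rt :: rc :: rest)
  | rest => rest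
termination_by l => l.length
decreasing_by all_goals (simp only [List.length_cons]; omega)

lemma pvGoB_short (rem : List (String × String)) (h : rem.length < 4) : pvGoB rem = rem := by
  match rem, h with
  | [], _ => simp [pvGoB]
  | [a], _ => simp [pvGoB]
  | [a, b], _ => simp [pvGoB]
  | [a, b, c], _ => simp [pvGoB]

lemma pvGoB_cons4 (lc lt rt rc : String × String) (rest : List (String × String)) :
    pvGoB (lc :: lt :: rt :: rc :: rest)
      = if pvHit lc lt rt rc then
          lc :: (lt.1, "NNS") :: (rt.1, "RB") :: rc :: pvGoB rest
        else lc :: pvGoB (lt :: rt :: rc :: rest) := by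
  rw [pvGoB]

lemma pvLoop_eq (sent : List (String × String)) :
    ∀ (k j : Nat) (acc : List (String × String)), j + k = sent.length →
    (PySem.List.pyRange (j : Int) (sent.length : Int) 1).foldl (pvStepA sent) (acc, 0)
      = (acc ++ pvGoB (sent.drop j), 0) := by
  intro k
  induction k using Nat.strong_induction_on with
  | _ k ih =>
    intro j acc hjk
    by_cases hk0 : k = 0
    · subst hk0
      rw [PySem.List.pyRange_one_eq_nil (by omega)]
      rw [List.drop_eq_nil_of_le (by omega)]
      simp [pvGoB]
    · have hjn : (j : Int) < (sent.length : Int) := by omega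
      have hjlt : j < sent.length := by omega
      rw [PySem.List.pyRange_one_cons hjn, List.foldl_cons]
      have hcast1 : (j : Int) + 1 = ((j + 1 : Nat) : Int) := by push_cast; ring
      by_cases hk3 : k ≤ 3
      · -- boundary branch: i+3 >= len(sent)
        have hstep : pvStepA sent (acc, 0) (j : Int)
            = (acc ++ [sent[j]], 0) := by
          rw [pvStepA]
          rw [if_neg (by omega)]
          rw [if_pos (by rw [PySem.Int.bor_comm, PySem.Int.bor_zero]; omega)]
          simp [List.getElem?_eq_getElem hjlt]
        have hdropj : sent.drop j = sent[j] :: sent.drop (j + 1) :=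
          (List.getElem_cons_drop hjlt).symm
        rw [hstep, hcast1, ih (k - 1) (by omega) (j + 1) _ (by omega),
          pvGoB_short (sent.drop (j + 1)) (by simp [List.length_drop]; omega), hdropj,
          pvGoB_short _ (by simp [List.length_drop]; omega)]
        simp
      · -- window branch: four tokens available
        have h1 : j + 1 < sent.length := by omega
        have h2 : j + 2 < sent.length := by omega
        have h3 : j + 3 < sent.length := by omega
        have hcast2 : (j : Int) + 2 = ((j + 2 : Nat) : Int) := by push_cast; ring
        have hcast3 : (j : Int) + 3 = ((j + 3 : Nat) : Int) := by push_cast; ring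
        have e2 : sent.drop (j + 1 + 1) = sent.drop (j + 2) :=
          congrArg (fun m => List.drop m sent) (by omega)
        have e3 : sent.drop (j + 2 + 1) = sent.drop (j + 3) :=
          congrArg (fun m => List.drop m sent) (by omega)
        have e4 : sent.drop (j + 3 + 1) = sent.drop (j + 4) :=
          congrArg (fun m => List.drop m sent) (by omega)
        have hdrop : sent.drop j
            = sent[j] :: sent[j + 1] :: sent[j + 2] :: sent[j + 3] :: sent.drop (j + 4) := by
          rw [← List.getElem_cons_drop hjlt, ← List.getElem_cons_drop h1, e2,
            ← List.getElem_cons_drop h2, e3, ← List.getElem_cons_drop h3, e4]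
        have hdrop1 : sent.drop (j + 1)
            = sent[j + 1] :: sent[j + 2] :: sent[j + 3] :: sent.drop (j + 4) := by
          have h := congrArg List.tail hdrop
          rw [List.tail_drop] at h
          exact h
        have hguard : ¬ ((j : Int) < PySem.Int.bor 0 ((j : Int) + 3)
            ∧ PySem.Int.bor 0 ((j : Int) + 3) ≥ (sent.length : Int)) := by
          rw [PySem.Int.bor_comm, PySem.Int.bor_zero]; omega
        have hgets : pvStepA sent (acc, 0) (j : Int)
            = if pvHit sent[j] sent[j + 1] sent[j + 2] sent[j + 3] then
                (acc ++ [sent[j]] ++ [(sent[j + 1].1, "NNS")] ++ [(sent[j + 2].1, "RB")]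
                  ++ [sent[j + 3]], 3)
              else (acc ++ [sent[j]], 0) := by
          rw [pvStepA, if_neg (by omega), if_neg hguard, hcast1, hcast2, hcast3]
          simp only [PySem.List.pyGetD_natCast, List.getD_eq_getElem?_getD,
            List.getElem?_eq_getElem hjlt, List.getElem?_eq_getElem h1,
            List.getElem?_eq_getElem h2, List.getElem?_eq_getElem h3, Option.getD_some]
        by_cases hhit : pvHit sent[j] sent[j + 1] sent[j + 2] sent[j + 3]
        · rw [hgets, if_pos hhit]
          have hskip : ∀ (s : Int) (i : Int) (a : List (String × String)), s > 0 →
              pvStepA sent (a, s) i = (a, s - 1) := by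
            intro s i a hs
            rw [pvStepA, if_pos hs]
          have hn1 : ((j + 1 : Nat) : Int) < (sent.length : Int) := by omega
          have hn2 : ((j + 2 : Nat) : Int) < (sent.length : Int) := by omega
          have hn3 : ((j + 3 : Nat) : Int) < (sent.length : Int) := by omega
          have hc12 : ((j + 1 : Nat) : Int) + 1 = ((j + 2 : Nat) : Int) := by push_cast; ring
          have hc23 : ((j + 2 : Nat) : Int) + 1 = ((j + 3 : Nat) : Int) := by push_cast; ring
          have hc34 : ((j + 3 : Nat) : Int) + 1 = ((j + 4 : Nat) : Int) := by push_cast; ring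
          rw [hcast1, PySem.List.pyRange_one_cons hn1, List.foldl_cons,
            hskip 3 _ _ (by omega), show (3 : Int) - 1 = 2 by norm_num]
          rw [hc12, PySem.List.pyRange_one_cons hn2, List.foldl_cons,
            hskip 2 _ _ (by omega), show (2 : Int) - 1 = 1 by norm_num]
          rw [hc23, PySem.List.pyRange_one_cons hn3, List.foldl_cons,
            hskip 1 _ _ (by omega), show (1 : Int) - 1 = 0 by norm_num]
          rw [hc34, ih (k - 4) (by omega) (j + 4) _ (by omega), hdrop,
            pvGoB_cons4, if_pos hhit]
          simp
        · rw [hgets, if_neg hhit]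
          rw [hcast1, ih (k - 1) (by omega) (j + 1) _ (by omega), hdrop,
            pvGoB_cons4, if_neg hhit, ← hdrop1]
          simp

-- one-step unfolding of B's scan
lemma pvScanB_eq (sent : List (String × String)) (i : Nat) (d : PySem.Dict Int String) :
    pvScanB sent i d
      = if h : i + 3 < sent.length then
          if pvHit (sent[i]'(by omega)) (sent[i+1]'(by omega)) (sent[i+2]'(by omega))
              (sent[i+3]'h) then
            pvScanB sent (i + 4) ((d.insert ((i : Int) + 1) "NNS").insert ((i : Int) + 2) "RB")
          else pvScanB sent (i + 1) d
        else d := by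
  rw [pvScanB]

-- the scan never records a key at or below its start index
lemma pvScan_get?_low : ∀ (fuel : Nat) (sent : List (String × String)) (i : Nat)
    (d : PySem.Dict Int String) (k : Int), sent.length - i ≤ fuel → k < (i : Int) + 1 →
    (pvScanB sent i d).get? k = d.get? k := by
  intro fuel
  induction fuel with
  | zero =>
    intro sent i d k hf hk
    rw [pvScanB_eq sent i d, dif_neg (by omega)]
  | succ m ih =>
    intro sent i d k hf hk
    rw [pvScanB_eq sent i d]
    by_cases h : i + 3 < sent.length
    · rw [dif_pos h]
      split
      · have hrec := ih sent (i + 4)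
          ((d.insert ((i : Int) + 1) "NNS").insert ((i : Int) + 2) "RB") k
          (by omega) (by omega)
        rw [hrec, PySem.Dict.get?_insert_of_ne _ _ (by omega),
          PySem.Dict.get?_insert_of_ne _ _ (by omega)]
      · have hrec := ih sent (i + 1) d k (by omega) (by omega)
        exact hrec
    · rw [dif_neg h]

-- scans from the same start agree wherever the start dicts agree above a threshold
lemma pvScan_get?_congr (t : Int) : ∀ (fuel : Nat) (sent : List (String × String)) (i : Nat)
    (d d' : PySem.Dict Int String),
    (∀ k : Int, t ≤ k → d.get? k = d'.get? k) →
    ∀ k : Int, t ≤ k → sent.length - i ≤ fuel →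
    (pvScanB sent i d).get? k = (pvScanB sent i d').get? k := by
  intro fuel
  induction fuel with
  | zero =>
    intro sent i d d' hdd k hk hf
    rw [pvScanB_eq sent i d, pvScanB_eq sent i d', dif_neg (by omega), dif_neg (by omega)]
    exact hdd k hk
  | succ m ih =>
    intro sent i d d' hdd k hk hf
    rw [pvScanB_eq sent i d, pvScanB_eq sent i d']
    by_cases h : i + 3 < sent.length
    · rw [dif_pos h, dif_pos h]
      split
      · refine ih sent (i + 4) _ _ ?_ k hk (by omega)
        intro k' hk'
        rw [PySem.Dict.get?_insert, PySem.Dict.get?_insert, PySem.Dict.get?_insert,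
          PySem.Dict.get?_insert]
        split_ifs with h1 h2
        · rfl
        · rfl
        · exact hdd k' hk'
      · refine ih sent (i + 1) d d' ?_ k hk (by omega)
        intro k' hk'
        exact hdd k' hk'
    · rw [dif_neg h, dif_neg h]
      exact hdd k hk

-- B's mark-then-rewrite equals the recursive characterisation, suffix by suffix
lemma pvScan_map_eq (sent : List (String × String)) :
    ∀ (k j : Nat), j + k = sent.length →
    (PySem.List.enumerate (sent.drop j) (j : Int)).map
        (fun p => (p.2.1, (pvScanB sent j PySem.Dict.empty).getD p.1 p.2.2))
      = pvGoB (sent.drop j) := by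
  intro k
  induction k using Nat.strong_induction_on with
  | _ k ih =>
    intro j hjk
    by_cases h : j + 3 < sent.length
    · have hjlt : j < sent.length := by omega
      have h1 : j + 1 < sent.length := by omega
      have h2 : j + 2 < sent.length := by omega
      have h3 : j + 3 < sent.length := by omega
      have e2 : sent.drop (j + 1 + 1) = sent.drop (j + 2) :=
        congrArg (fun m => List.drop m sent) (by omega)
      have e3 : sent.drop (j + 2 + 1) = sent.drop (j + 3) :=
        congrArg (fun m => List.drop m sent) (by omega)
      have e4 : sent.drop (j + 3 + 1) = sent.drop (j + 4) :=
        congrArg (fun m => List.drop m sent) (by omega)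
      have hdrop : sent.drop j
          = sent[j] :: sent[j + 1] :: sent[j + 2] :: sent[j + 3] :: sent.drop (j + 4) := by
        rw [← List.getElem_cons_drop hjlt, ← List.getElem_cons_drop h1, e2,
          ← List.getElem_cons_drop h2, e3, ← List.getElem_cons_drop h3, e4]
      have hscan := pvScanB_eq sent j (PySem.Dict.empty)
      rw [dif_pos h] at hscan
      by_cases hhit : pvHit sent[j] sent[j + 1] sent[j + 2] sent[j + 3]
      · rw [if_pos hhit] at hscan
        set d2 : PySem.Dict Int String :=
          ((PySem.Dict.empty.insert ((j : Int) + 1) "NNS").insert ((j : Int) + 2) "RB") with hd2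
        have hget : ∀ k : Int, k < (j : Int) + 4 + 1 →
            (pvScanB sent j PySem.Dict.empty).get? k = d2.get? k := by
          intro k hk
          rw [hscan]
          exact pvScan_get?_low (sent.length - (j + 4)) sent (j + 4) d2 k (by omega) (by omega)
        have hv0 : (pvScanB sent j PySem.Dict.empty).getD (j : Int) sent[j].2 = sent[j].2 := by
          rw [PySem.Dict.getD_eq_get?_getD, hget _ (by omega), hd2,
            PySem.Dict.get?_insert_of_ne _ _ (by omega),
            PySem.Dict.get?_insert_of_ne _ _ (by omega), PySem.Dict.get?_empty,
            Option.getD_none]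
        have hv1 : (pvScanB sent j PySem.Dict.empty).getD ((j : Int) + 1) sent[j + 1].2
            = "NNS" := by
          rw [PySem.Dict.getD_eq_get?_getD, hget _ (by omega), hd2,
            PySem.Dict.get?_insert_of_ne _ _ (by omega), PySem.Dict.get?_insert_self,
            Option.getD_some]
        have hv2 : (pvScanB sent j PySem.Dict.empty).getD ((j : Int) + 2) sent[j + 2].2
            = "RB" := by
          rw [PySem.Dict.getD_eq_get?_getD, hget _ (by omega), PySem.Dict.get?_insert_self,
            Option.getD_some]
        have hv3 : (pvScanB sent j PySem.Dict.empty).getD ((j : Int) + 3) sent[j + 3].2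
            = sent[j + 3].2 := by
          rw [PySem.Dict.getD_eq_get?_getD, hget _ (by omega), hd2,
            PySem.Dict.get?_insert_of_ne _ _ (by omega),
            PySem.Dict.get?_insert_of_ne _ _ (by omega), PySem.Dict.get?_empty,
            Option.getD_none]
        have htail : (PySem.List.enumerate (sent.drop (j + 4)) ((j : Int) + 4)).map
              (fun p => (p.2.1, (pvScanB sent j PySem.Dict.empty).getD p.1 p.2.2))
            = pvGoB (sent.drop (j + 4)) := by
          have hc4 : (j : Int) + 4 = ((j + 4 : Nat) : Int) := by push_cast; ring
          rw [hc4]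
          rw [List.map_congr_left (l := PySem.List.enumerate (sent.drop (j + 4)) ((j + 4 : Nat) : Int))
            (f := fun p => (p.2.1, (pvScanB sent j PySem.Dict.empty).getD p.1 p.2.2))
            (g := fun p => (p.2.1, (pvScanB sent (j + 4) PySem.Dict.empty).getD p.1 p.2.2))
            ?_]
          · exact ih (k - 4) (by omega) (j + 4) (by omega)
          · intro p hp
            obtain ⟨kk, hkk, hpv⟩ := (PySem.List.mem_enumerate_iff _ _ _).1 hp
            have hpk : ((j + 4 : Nat) : Int) ≤ p.1 := by rw [hpv]; push_cast; omega
            have : (pvScanB sent j PySem.Dict.empty).get? p.1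
                = (pvScanB sent (j + 4) PySem.Dict.empty).get? p.1 := by
              rw [hscan]
              refine pvScan_get?_congr (((j + 4 : Nat) : Int)) (sent.length - (j + 4)) sent
                (j + 4) d2 PySem.Dict.empty ?_ p.1 hpk (by omega)
              intro k' hk'
              rw [hd2, PySem.Dict.get?_insert_of_ne _ _ (by omega),
                PySem.Dict.get?_insert_of_ne _ _ (by omega)]
            simp only [PySem.Dict.getD_eq_get?_getD, this]
        rw [hdrop, PySem.List.enumerate_cons, PySem.List.enumerate_cons,
          PySem.List.enumerate_cons, PySem.List.enumerate_cons, List.map_cons,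
          List.map_cons, List.map_cons, List.map_cons]
        simp only []
        rw [pvGoB_cons4, if_pos hhit]
        have harith : (j : Int) + 1 + 1 + 1 + 1 = (j : Int) + 4 := by ring
        rw [show (j:Int)+1+1 = (j:Int)+2 by ring, show (j:Int)+2+1 = (j:Int)+3 by ring,
          show (j:Int)+3+1 = (j:Int)+4 by ring]
        rw [hv0, hv1, hv2, hv3, htail]
      · rw [if_neg hhit] at hscan
        have hget : ∀ k : Int, k < (j : Int) + 1 + 1 →
            (pvScanB sent j PySem.Dict.empty).get? k = PySem.Dict.empty.get? k := by
          intro k hk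
          rw [hscan]
          exact pvScan_get?_low (sent.length - (j + 1)) sent (j + 1) _ k (by omega) (by omega)
        have hv0 : (pvScanB sent j PySem.Dict.empty).getD (j : Int) sent[j].2 = sent[j].2 := by
          rw [PySem.Dict.getD_eq_get?_getD, hget _ (by omega), PySem.Dict.get?_empty,
            Option.getD_none]
        have hdropj : sent.drop j = sent[j] :: sent.drop (j + 1) :=
          (List.getElem_cons_drop hjlt).symm
        have htail : (PySem.List.enumerate (sent.drop (j + 1)) ((j : Int) + 1)).map
              (fun p => (p.2.1, (pvScanB sent j PySem.Dict.empty).getD p.1 p.2.2))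
            = pvGoB (sent.drop (j + 1)) := by
          have hc1 : (j : Int) + 1 = ((j + 1 : Nat) : Int) := by push_cast; ring
          rw [hc1, hscan]
          exact ih (k - 1) (by omega) (j + 1) (by omega)
        have hdrop1 : sent.drop (j + 1)
            = sent[j + 1] :: sent[j + 2] :: sent[j + 3] :: sent.drop (j + 4) := by
          have hx := congrArg List.tail hdrop
          rw [List.tail_drop] at hx
          exact hx
        rw [hdropj, PySem.List.enumerate_cons, List.map_cons]
        simp only []
        rw [hv0, htail, hdrop1, pvGoB_cons4, if_neg hhit, ← hdrop1]
    · -- fewer than four tokens left: the scan records nothing, the map is the identity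
      have hscan : pvScanB sent j PySem.Dict.empty = PySem.Dict.empty := by
        rw [pvScanB_eq, dif_neg h]
      rw [hscan]
      have hmap : (PySem.List.enumerate (sent.drop j) (j : Int)).map
          (fun p => (p.2.1, (PySem.Dict.empty : PySem.Dict Int String).getD p.1 p.2.2))
          = sent.drop j := by
        rw [List.map_congr_left (g := fun p => p.2) ?_]
        · exact PySem.List.map_snd_enumerate _ _
        · intro p _
          simp [PySem.Dict.getD_eq_get?_getD, PySem.Dict.get?_empty]
      rw [hmap, pvGoB_short _ (by simp [List.length_drop]; omega)]

theorem CD_UNK_there_PUNC_Tagger_spec : Claim_equal_CD_UNK_there_PUNC_Tagger := by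
  intro sent _
  unfold Spec_CD_UNK_there_PUNC_Tagger CD_UNK_there_PUNC_Tagger CD_UNK_there_PUNC_Tagger_alt
  have hA := pvLoop_eq sent sent.length 0 [] (by omega)
  have hB := pvScan_map_eq sent sent.length 0 (by omega)
  simp only [List.drop_zero] at hB
  simp only [Nat.cast_zero] at hA hB ⊢
  rw [congrArg Prod.fst hA]
  simp only [List.nil_append]
  exact hB.symm
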